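-- pv_equiv track=rewrite | github.com/mroncarelli/pyxhydro | xraysim/specutils/tables.py | largest_index_smaller
-- ===== SOURCE A (Python) =====
-- def largest_index_smaller(array, value):
--     """
--     Returns the largest index whose value is smaller than the input value. Assumes the array is sorted in ascending
--     order.
--     :param array: array (sorted ascending) to search into
--     :param value: value: value to search
--     :return: index of the largest value smaller than the input value
--     """
--     idx = len(array) - 1
--     while idx > 0 and array[idx] >= value:
--         idx += -1
--
--     if array[idx] < value:
--         return idx
--     else:
--         return None
-- ===== SOURCE B (Python) =====
-- def largest_index_smaller(array, value):
--     """Single forward pass keeping the last index whose element is < value."""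
--     res = None
--     for i, x in enumerate(array):
--         if x < value:
--             res = i
--     return res
-- ===== Notes on version B (the rewrite author's own statement) =====
-- stated objective: simpler
-- what changed: Replaces the backward while-loop with end-index bookkeeping and a post-loop recheck by a single forward enumerate pass that keeps the last index whose element is smaller than value.
-- outside the precondition, e.g. on largest_index_smaller([], 0): A raises IndexError, B returns None
-- crash fix: On an empty array A raises IndexError (array[-1] after the loop); B returns None. — e.g. on largest_index_smaller([], 0): A raises IndexError, B returns none
import Mathlib
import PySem

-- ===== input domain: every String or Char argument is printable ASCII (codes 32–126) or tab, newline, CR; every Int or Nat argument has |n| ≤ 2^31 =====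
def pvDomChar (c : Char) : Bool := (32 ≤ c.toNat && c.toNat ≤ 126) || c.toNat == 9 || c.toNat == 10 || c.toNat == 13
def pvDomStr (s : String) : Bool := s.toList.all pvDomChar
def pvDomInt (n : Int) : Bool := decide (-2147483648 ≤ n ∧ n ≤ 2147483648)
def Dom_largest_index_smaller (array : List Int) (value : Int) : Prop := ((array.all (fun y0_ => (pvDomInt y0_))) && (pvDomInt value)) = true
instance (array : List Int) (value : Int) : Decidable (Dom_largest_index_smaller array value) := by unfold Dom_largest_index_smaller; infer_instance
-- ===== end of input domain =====

-- B replaces A's backward while-loop (end-index bookkeeping + post-loop recheck) by one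
-- forward enumerate pass keeping the last index whose element is < value; objective: simpler.


-- ===== PORT A =====
-- while idx > 0 and array[idx] >= value: idx += -1   (idx is always a valid index here)
def lisLoop (array : List Int) (value : Int) : Nat → Nat
  | 0 => 0
  | k + 1 => if value ≤ array.getD (k + 1) 0 then lisLoop array value k else k + 1

def largest_index_smaller (array : List Int) (value : Int) : Option Int :=
  if array.length = 0 then none   -- Python: array[-1] raises IndexError (outside Pre_)
  else
    let idx := lisLoop array value (array.length - 1)
    if array.getD idx 0 < value then some (idx : Int) else none

-- ===== PORT B =====
def largest_index_smaller_alt (array : List Int) (value : Int) : Option Int :=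
  (PySem.List.enumerate array).foldl
    (fun res p => if p.2 < value then some p.1 else res) none

-- ===== PRECONDITION & SPEC =====
-- Pre_ excludes only the empty array, on which Python A raises IndexError (array[-1]).
def Pre_largest_index_smaller (array : List Int) (value : Int) : Prop := array ≠ []
instance (array : List Int) (value : Int) : Decidable (Pre_largest_index_smaller array value) := by unfold Pre_largest_index_smaller; infer_instance

def pvWitness_largest_index_smaller : List Int × Int := ([1, 3, 5], 4)

-- On the empty array A raises IndexError (array[-1] after the loop); B returns None.
def Raises_largest_index_smaller (array : List Int) (value : Int) : Prop := array = []
instance (array : List Int) (value : Int) : Decidable (Raises_largest_index_smaller array value) := by unfold Raises_largest_index_smaller; infer_instance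
def pvRaiseWitness_largest_index_smaller : List Int × Int := ([], 0)
def pvRaiseWitnessOut_largest_index_smaller : Option Int := none

def Spec_largest_index_smaller (array : List Int) (value : Int) (out : Option Int) : Prop := out = largest_index_smaller_alt array value
instance (array : List Int) (value : Int) (out : Option Int) : Decidable (Spec_largest_index_smaller array value out) := by unfold Spec_largest_index_smaller; infer_instance

-- ===== CLAIM (what is proved, stated in full; the proofs are below) =====
def Claim_equal_largest_index_smaller : Prop := ∀ (array : List Int) (value : Int), Dom_largest_index_smaller array value → Pre_largest_index_smaller array value → Spec_largest_index_smaller array value (largest_index_smaller array value)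

def Claim_raises_largest_index_smaller : Prop := (∀ (array : List Int) (value : Int), Dom_largest_index_smaller array value → Raises_largest_index_smaller array value → ¬ Pre_largest_index_smaller array value) ∧ (Dom_largest_index_smaller (pvRaiseWitness_largest_index_smaller.1) (pvRaiseWitness_largest_index_smaller.2) ∧ Raises_largest_index_smaller (pvRaiseWitness_largest_index_smaller.1) (pvRaiseWitness_largest_index_smaller.2) ∧ largest_index_smaller_alt (pvRaiseWitness_largest_index_smaller.1) (pvRaiseWitness_largest_index_smaller.2) = pvRaiseWitnessOut_largest_index_smaller)

-- ===== LEMMAS AND PROOFS =====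

-- the loop index never increases
theorem lisLoop_le (array : List Int) (value : Int) : ∀ k, lisLoop array value k ≤ k := by
  intro k
  induction k with
  | zero => simp [lisLoop]
  | succ k ih =>
    simp only [lisLoop]
    split
    · omega
    · omega

-- the loop only looks at indices ≤ k, so appending past them does not change it
theorem lisLoop_append (xs : List Int) (x value : Int) :
    ∀ k, k < xs.length → lisLoop (xs ++ [x]) value k = lisLoop xs value k := by
  intro k
  induction k with
  | zero => simp [lisLoop]
  | succ k ih =>
    intro hk
    have hget : (xs ++ [x]).getD (k + 1) 0 = xs.getD (k + 1) 0 := by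
      simp [List.getD, List.getElem?_append_left hk]
    simp only [lisLoop, hget]
    split
    · exact ih (by omega)
    · rfl

-- B on xs ++ [x]
theorem alt_append (xs : List Int) (x value : Int) :
    largest_index_smaller_alt (xs ++ [x]) value =
      if x < value then some (xs.length : Int) else largest_index_smaller_alt xs value := by
  simp only [largest_index_smaller_alt, PySem.List.enumerate_append, List.foldl_append]
  simp [PySem.List.enumerate]

theorem main_eq (value : Int) :
    ∀ array : List Int, array ≠ [] →
      largest_index_smaller array value = largest_index_smaller_alt array value := by
  intro array
  induction array using List.reverseRecOn with
  | nil => intro h; exact absurd rfl h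
  | append_singleton xs x ih =>
    intro _
    rw [alt_append]
    by_cases hxs : xs = []
    · subst hxs
      simp only [largest_index_smaller, lisLoop, List.nil_append, List.length_cons,
        List.length_nil, largest_index_smaller_alt, PySem.List.enumerate]
      by_cases hx : x < value
      · simp [hx, List.getD]
      · simp [hx, List.getD]
    · have hlen : xs.length ≠ 0 := by simpa [List.length_eq_zero_iff] using hxs
      have hgetx : (xs ++ [x]).getD xs.length 0 = x := by
        simp [List.getD]
      have hlen2 : (xs ++ [x]).length - 1 = xs.length := by simp
      by_cases hx : x < value
      · -- loop stops immediately at the last index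
        simp only [largest_index_smaller, hlen2]
        have : lisLoop (xs ++ [x]) value xs.length = xs.length := by
          obtain ⟨m, hm⟩ : ∃ m, xs.length = m + 1 := ⟨xs.length - 1, by omega⟩
          rw [hm]
          simp only [lisLoop]
          rw [if_neg]
          rw [← hm, hgetx]; exact not_le.mpr hx
        rw [if_neg (by simp)]
        simp only [this, hgetx]
        rw [if_pos hx, if_pos hx]
      · -- x ≥ value: one decrement step, then A behaves as on xs
        rw [if_neg hx]
        rw [← ih hxs]
        simp only [largest_index_smaller, hlen2]
        rw [if_neg (by simp), if_neg hlen]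
        obtain ⟨m, hm⟩ : ∃ m, xs.length = m + 1 := ⟨xs.length - 1, by omega⟩
        have hstep : lisLoop (xs ++ [x]) value xs.length = lisLoop xs value (xs.length - 1) := by
          rw [hm]
          simp only [lisLoop]
          rw [if_pos (by rw [← hm, hgetx]; exact not_lt.mp hx)]
          rw [lisLoop_append xs x value m (by omega)]
          simp
        rw [hstep]
        have hidx : lisLoop xs value (xs.length - 1) < xs.length :=
          lt_of_le_of_lt (lisLoop_le xs value _) (by omega)
        have : (xs ++ [x]).getD (lisLoop xs value (xs.length - 1)) 0
             = xs.getD (lisLoop xs value (xs.length - 1)) 0 := by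
          simp [List.getD, List.getElem?_append_left hidx]
        rw [this]


-- ===== VERDICT (by name: the statement is the Claim_ definition above) =====
theorem largest_index_smaller_spec : Claim_equal_largest_index_smaller := by
  intro array value _ hpre
  exact main_eq value array hpre

def largest_index_smaller_raises : Claim_raises_largest_index_smaller := by
  unfold Claim_raises_largest_index_smaller
  exact ⟨fun a v _ hr hp => hp hr, by decide⟩
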